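-- pv_equiv track=rewrite | github.com/wangzoe/weeklyQ-prison | rat_nice_prison.py | prison_delima
-- ===== SOURCE A (Python) =====
-- def prison_delima(n, strategy1, strategy2):
--     suspect1=0
--     suspect2=0
--     while n > 0:
--         if strategy1=="nice" and strategy2=='nice':
--             suspect1 += 1
--             suspect2 += 1
--             n -= 1
--         elif strategy1=='nice' and strategy2=='rat':
--             suspect1 += 5
--             suspect2 += 0
--             n -= 1
--         elif strategy1=='nice' and strategy2=='rat-nice':
--             suspect1 += 5
--             suspect2 += 0
--             strategy2 = 'nice'
--             n -= 1
--         elif strategy1=='rat' and strategy2=='nice':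
--             suspect1 += 0
--             suspect2 += 5
--             n -= 1
--         elif strategy1=='rat' and strategy2=='rat':
--             suspect1 += 2
--             suspect2 += 2
--             n -= 1
--         elif strategy1=='rat' and strategy2=='rat-nice':
--             suspect1 += 2
--             suspect2 += 2
--             strategy2 = 'rat'
--             n -= 1
--         elif strategy1=='rat-nice' and strategy2=='nice':
--             suspect1 += 0
--             suspect2 += 5
--             strategy1 = 'nice'
--             n -= 1
--         elif strategy1=='rat-nice' and strategy2=='rat':
--             suspect1 += 2
--             suspect2 += 2
--             strategy1 = 'rat'
--             n -=1
--         elif strategy1=='rat-nice' and strategy2=='rat-nice':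
--             suspect1 += 2
--             suspect2 += 2
--             strategy1 = 'rat'
--             strategy2 = 'rat'
--             n -= 1
--
--     return (suspect1, suspect2)
-- ===== SOURCE B (Python) =====
-- def prison_delima(n, strategy1, strategy2):
--     # O(1) closed form: play the first round (rat-nice defects), resolve rat-nice
--     # to its stable strategy, then multiply the stable payoff by the remaining rounds.
--     if n <= 0:
--         return (0, 0)
--
--     def act(s):
--         return 'rat' if s == 'rat-nice' else s
--
--     def settle(s, other):
--         if s == 'rat-nice':
--             return 'nice' if other == 'nice' else 'rat'
--         return s
--
--     def pay(a, b):
--         if a == 'nice':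
--             return (1, 1) if b == 'nice' else (5, 0)
--         else:
--             return (0, 5) if b == 'nice' else (2, 2)
--
--     f1, f2 = pay(act(strategy1), act(strategy2))
--     q1, q2 = pay(settle(strategy1, strategy2), settle(strategy2, strategy1))
--     return (f1 + (n - 1) * q1, f2 + (n - 1) * q2)
-- ===== Notes on version B (the rewrite author's own statement) =====
-- stated objective: simpler
-- what changed: Replaces the round-by-round while loop with a closed form: play the first round, resolve 'rat-nice' to its stable strategy (nice vs a nice opponent, rat otherwise), and add (n-1) times the stable per-round payoff; intended as faster (O(1) vs O(n)) but a timing run could not confirm a ratio since A diverges on that run's random strategy strings. Pre_ excludes only inputs where A never returns: n > 0 with a strategy outside {nice, rat, rat-nice}, on which A's while loop runs forever.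
import Mathlib
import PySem

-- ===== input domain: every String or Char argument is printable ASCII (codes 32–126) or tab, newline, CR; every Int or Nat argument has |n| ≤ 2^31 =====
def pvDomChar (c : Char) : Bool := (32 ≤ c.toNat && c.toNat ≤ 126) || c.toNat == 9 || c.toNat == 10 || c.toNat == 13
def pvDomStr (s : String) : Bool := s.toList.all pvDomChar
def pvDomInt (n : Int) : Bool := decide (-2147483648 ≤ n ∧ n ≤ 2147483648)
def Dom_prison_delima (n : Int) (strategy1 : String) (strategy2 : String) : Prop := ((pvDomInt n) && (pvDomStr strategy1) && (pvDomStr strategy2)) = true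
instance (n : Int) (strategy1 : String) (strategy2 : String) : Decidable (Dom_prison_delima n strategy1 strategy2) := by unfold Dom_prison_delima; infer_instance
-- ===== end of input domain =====

-- B replaces A's round-by-round while loop with a closed form: play the first
-- round, resolve 'rat-nice' to its stable strategy, and add (n-1) times the
-- stable per-round payoff.

-- ===== PORT A =====
-- A's while loop, with fuel n.toNat (each recognized branch decrements n by 1,
-- so the fuel is exact within Pre_; outside Pre_ the Python loop never terminates).
def prisonLoop : Nat → Int → String → String → Int → Int → List Int
  | 0, _, _, _, s1acc, s2acc => [s1acc, s2acc]
  | fuel + 1, n, strategy1, strategy2, suspect1, suspect2 =>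
    if n > 0 then
      if strategy1 = "nice" ∧ strategy2 = "nice" then
        prisonLoop fuel (n - 1) strategy1 strategy2 (suspect1 + 1) (suspect2 + 1)
      else if strategy1 = "nice" ∧ strategy2 = "rat" then
        prisonLoop fuel (n - 1) strategy1 strategy2 (suspect1 + 5) (suspect2 + 0)
      else if strategy1 = "nice" ∧ strategy2 = "rat-nice" then
        prisonLoop fuel (n - 1) strategy1 "nice" (suspect1 + 5) (suspect2 + 0)
      else if strategy1 = "rat" ∧ strategy2 = "nice" then
        prisonLoop fuel (n - 1) strategy1 strategy2 (suspect1 + 0) (suspect2 + 5)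
      else if strategy1 = "rat" ∧ strategy2 = "rat" then
        prisonLoop fuel (n - 1) strategy1 strategy2 (suspect1 + 2) (suspect2 + 2)
      else if strategy1 = "rat" ∧ strategy2 = "rat-nice" then
        prisonLoop fuel (n - 1) strategy1 "rat" (suspect1 + 2) (suspect2 + 2)
      else if strategy1 = "rat-nice" ∧ strategy2 = "nice" then
        prisonLoop fuel (n - 1) "nice" strategy2 (suspect1 + 0) (suspect2 + 5)
      else if strategy1 = "rat-nice" ∧ strategy2 = "rat" then
        prisonLoop fuel (n - 1) "rat" strategy2 (suspect1 + 2) (suspect2 + 2)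
      else if strategy1 = "rat-nice" ∧ strategy2 = "rat-nice" then
        prisonLoop fuel (n - 1) "rat" "rat" (suspect1 + 2) (suspect2 + 2)
      else
        [suspect1, suspect2]  -- unreachable within Pre_: the Python loop spins forever here
    else
      [suspect1, suspect2]

def prison_delima (n : Int) (strategy1 : String) (strategy2 : String) : List Int :=
  prisonLoop n.toNat n strategy1 strategy2 0 0

-- ===== PORT B =====
-- Source B's helpers: how a strategy acts in round 1, what it settles to afterwards,
-- and the per-round payoff of two settled strategies.
def pvAct (s : String) : String := if s = "rat-nice" then "rat" else s

def pvSettle (s other : String) : String :=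
  if s = "rat-nice" then (if other = "nice" then "nice" else "rat") else s

def pvPay (a b : String) : Int × Int :=
  if a = "nice" then (if b = "nice" then (1, 1) else (5, 0))
  else (if b = "nice" then (0, 5) else (2, 2))

def prison_delima_alt (n : Int) (strategy1 : String) (strategy2 : String) : List Int :=
  if n ≤ 0 then [0, 0]
  else
    let f := pvPay (pvAct strategy1) (pvAct strategy2)
    let q := pvPay (pvSettle strategy1 strategy2) (pvSettle strategy2 strategy1)
    [f.1 + (n - 1) * q.1, f.2 + (n - 1) * q.2]

-- ===== PRECONDITION & SPEC =====
-- Pre_ excludes only inputs on which A never returns: with n > 0 and a strategy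
-- outside {"nice","rat","rat-nice"} no branch of A's while loop fires, n is never
-- decremented, and A diverges.
def Pre_prison_delima (n : Int) (strategy1 : String) (strategy2 : String) : Prop :=
  n ≤ 0 ∨
    ((strategy1 = "nice" ∨ strategy1 = "rat" ∨ strategy1 = "rat-nice") ∧
     (strategy2 = "nice" ∨ strategy2 = "rat" ∨ strategy2 = "rat-nice"))

instance (n : Int) (strategy1 : String) (strategy2 : String) : Decidable (Pre_prison_delima n strategy1 strategy2) := by unfold Pre_prison_delima; infer_instance

def pvWitness_prison_delima : Int × String × String := (4, "rat-nice", "nice")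

def Spec_prison_delima (n : Int) (strategy1 : String) (strategy2 : String) (out : List Int) : Prop := out = prison_delima_alt n strategy1 strategy2
instance (n : Int) (strategy1 : String) (strategy2 : String) (out : List Int) : Decidable (Spec_prison_delima n strategy1 strategy2 out) := by unfold Spec_prison_delima; infer_instance

-- ===== CLAIM (what is proved, stated in full; the proofs are below) =====
def Claim_equal_prison_delima : Prop := ∀ (n : Int) (strategy1 : String) (strategy2 : String), Dom_prison_delima n strategy1 strategy2 → Pre_prison_delima n strategy1 strategy2 → Spec_prison_delima n strategy1 strategy2 (prison_delima n strategy1 strategy2)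

-- ===== LEMMAS AND PROOFS =====

-- On a stable strategy pair the loop adds its fixed per-round payoff k times.
theorem loopNN : ∀ (k : Nat) (a1 a2 : Int), prisonLoop k (k : Int) "nice" "nice" a1 a2 = [a1 + k, a2 + k] := by
  intro k
  induction k with
  | zero => intro a1 a2; simp [prisonLoop]
  | succ k ih =>
    intro a1 a2
    have h : ((k + 1 : Nat) : Int) - 1 = (k : Int) := by push_cast; ring
    simp only [prisonLoop]
    rw [if_pos (by positivity), if_pos (by decide : _ ∧ _), h, ih]
    simp only [List.cons.injEq, and_true]
    refine ⟨by push_cast; ring, by push_cast; ring⟩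

theorem loopNR : ∀ (k : Nat) (a1 a2 : Int), prisonLoop k (k : Int) "nice" "rat" a1 a2 = [a1 + 5 * k, a2] := by
  intro k
  induction k with
  | zero => intro a1 a2; simp [prisonLoop]
  | succ k ih =>
    intro a1 a2
    have h : ((k + 1 : Nat) : Int) - 1 = (k : Int) := by push_cast; ring
    simp only [prisonLoop]
    rw [if_pos (by positivity), if_neg (by decide), if_pos (by decide : _ ∧ _), h, ih]
    simp only [List.cons.injEq, and_true]
    refine ⟨by push_cast; ring, by ring⟩

theorem loopRN : ∀ (k : Nat) (a1 a2 : Int), prisonLoop k (k : Int) "rat" "nice" a1 a2 = [a1, a2 + 5 * k] := by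
  intro k
  induction k with
  | zero => intro a1 a2; simp [prisonLoop]
  | succ k ih =>
    intro a1 a2
    have h : ((k + 1 : Nat) : Int) - 1 = (k : Int) := by push_cast; ring
    simp only [prisonLoop]
    rw [if_pos (by positivity), if_neg (by decide), if_neg (by decide), if_neg (by decide),
        if_pos (by decide : _ ∧ _), h, ih]
    simp only [List.cons.injEq, and_true]
    refine ⟨by ring, by push_cast; ring⟩

theorem loopRR : ∀ (k : Nat) (a1 a2 : Int), prisonLoop k (k : Int) "rat" "rat" a1 a2 = [a1 + 2 * k, a2 + 2 * k] := by
  intro k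
  induction k with
  | zero => intro a1 a2; simp [prisonLoop]
  | succ k ih =>
    intro a1 a2
    have h : ((k + 1 : Nat) : Int) - 1 = (k : Int) := by push_cast; ring
    simp only [prisonLoop]
    rw [if_pos (by positivity), if_neg (by decide), if_neg (by decide), if_neg (by decide),
        if_neg (by decide), if_pos (by decide : _ ∧ _), h, ih]
    simp only [List.cons.injEq, and_true]
    refine ⟨by push_cast; ring, by push_cast; ring⟩

theorem prison_delima_core (n : Int) (strategy1 strategy2 : String)
    (hpre : Pre_prison_delima n strategy1 strategy2) :
    prison_delima n strategy1 strategy2 = prison_delima_alt n strategy1 strategy2 := by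
  by_cases hn : n ≤ 0
  · have h0 : n.toNat = 0 := Int.toNat_of_nonpos hn
    simp [prison_delima, prison_delima_alt, h0, prisonLoop, hn]
  · rw [not_le] at hn
    rcases hpre with h | ⟨hs1, hs2⟩
    · omega
    have hnt : (n.toNat : Int) = n := Int.toNat_of_nonneg (le_of_lt hn)
    obtain ⟨k, hk⟩ : ∃ k, n.toNat = k + 1 := ⟨n.toNat - 1, by omega⟩
    have hkcast : (k : Int) + 1 = n := by rw [← hnt, hk]; push_cast; ring
    have hstep : n - 1 = (k : Int) := by omega
    have halt : ¬ n ≤ 0 := not_le.mpr hn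
    rcases hs1 with h1 | h1 | h1 <;> rcases hs2 with h2 | h2 | h2 <;> subst h1 <;> subst h2 <;>
      rw [prison_delima, hk] <;> simp only [prisonLoop] <;> rw [if_pos hn]
    · rw [if_pos (by decide : _ ∧ _), hstep, loopNN]
      simp [prison_delima_alt, pvAct, pvSettle, pvPay, halt]
      omega
    · rw [if_neg (by decide), if_pos (by decide : _ ∧ _), hstep, loopNR]
      simp [prison_delima_alt, pvAct, pvSettle, pvPay, halt]
      omega
    · rw [if_neg (by decide), if_neg (by decide), if_pos (by decide : _ ∧ _), hstep, loopNN]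
      simp [prison_delima_alt, pvAct, pvSettle, pvPay, halt]
      omega
    · rw [if_neg (by decide), if_neg (by decide), if_neg (by decide), if_pos (by decide : _ ∧ _), hstep, loopRN]
      simp [prison_delima_alt, pvAct, pvSettle, pvPay, halt]
      omega
    · rw [if_neg (by decide), if_neg (by decide), if_neg (by decide), if_neg (by decide),
          if_pos (by decide : _ ∧ _), hstep, loopRR]
      simp [prison_delima_alt, pvAct, pvSettle, pvPay, halt]
      omega
    · rw [if_neg (by decide), if_neg (by decide), if_neg (by decide), if_neg (by decide),
          if_neg (by decide), if_pos (by decide : _ ∧ _), hstep, loopRR]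
      simp [prison_delima_alt, pvAct, pvSettle, pvPay, halt]
      omega
    · rw [if_neg (by decide), if_neg (by decide), if_neg (by decide), if_neg (by decide),
          if_neg (by decide), if_neg (by decide), if_pos (by decide : _ ∧ _), hstep, loopNN]
      simp [prison_delima_alt, pvAct, pvSettle, pvPay, halt]
      omega
    · rw [if_neg (by decide), if_neg (by decide), if_neg (by decide), if_neg (by decide),
          if_neg (by decide), if_neg (by decide), if_neg (by decide), if_pos (by decide : _ ∧ _), hstep, loopRR]
      simp [prison_delima_alt, pvAct, pvSettle, pvPay, halt]
      omega
    · rw [if_neg (by decide), if_neg (by decide), if_neg (by decide), if_neg (by decide),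
          if_neg (by decide), if_neg (by decide), if_neg (by decide), if_neg (by decide),
          if_pos (by decide : _ ∧ _), hstep, loopRR]
      simp [prison_delima_alt, pvAct, pvSettle, pvPay, halt]
      omega

-- ===== VERDICT (by name: the statement is the Claim_ definition above) =====
theorem prison_delima_spec : Claim_equal_prison_delima := by
  intro n s1 s2 _ hpre
  exact prison_delima_core n s1 s2 hpre
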